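-- pv_equiv track=rewrite | github.com/verba-neo/multi-it-ai-2 | p121683-외톨이알파벳/김진산.py | solution
-- ===== SOURCE A (Python) =====
-- def solution(input_string):
--     answer = ''
--     solo_alphabet = []
--     check_list = []
--     temp = []
--     for i in input_string:  # input_string을 check_list에 list 형식으로 append
--         check_list.append(i)
--     for i in range(0, len(check_list)-1):   # idx 범위를 벗어나지 않기 위해 전체 리스트 보다 한개 작게 반복
--         if check_list[i] != check_list[i + 1]:  # check_list의 i번째와 i + 1 번쨰가 같지 않은지 확인
--             for j in range(i + 1, len(check_list)):     # 같지 않다면 반복해서 i + 1 번부터 반복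
--                 if check_list[i] == check_list[j]:  # i번째와 i + 1 (j)번째가 같은지 반복 체크
--                     solo_alphabet.append(check_list[i])     # 같다면 solo_alphabet 리스트에 append
--
--     if len(solo_alphabet) == 0:     # solo_alphabet이 길이가 0 이면 N 출력
--         answer = 'N'
--         return answer
--     else:                           # 아니면 solo_alphabet에 있는 중복 값들을 정렬해서 temp에 삽입
--         temp = list(sorted(set(solo_alphabet)))
--         answer = ''.join(temp)
--         return answer
-- ===== SOURCE B (Python) =====
-- def solution(input_string):
--     # One pass: count the number of runs of each character; a character in >= 2 runs is "lonely".
--     counts = {}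
--     prev = None
--     for ch in input_string:
--         if ch != prev:
--             counts[ch] = counts.get(ch, 0) + 1
--         prev = ch
--     lonely = sorted(c for c, n in counts.items() if n >= 2)
--     return ''.join(lonely) if lonely else 'N'
-- ===== Notes on version B (the rewrite author's own statement) =====
-- stated objective: faster
-- what changed: Replaces A's quadratic nested index scans (for each run boundary, rescan the rest of the string) by a single pass that counts runs per character in a dict, then sorts the characters with at least two runs.
import Mathlib
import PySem

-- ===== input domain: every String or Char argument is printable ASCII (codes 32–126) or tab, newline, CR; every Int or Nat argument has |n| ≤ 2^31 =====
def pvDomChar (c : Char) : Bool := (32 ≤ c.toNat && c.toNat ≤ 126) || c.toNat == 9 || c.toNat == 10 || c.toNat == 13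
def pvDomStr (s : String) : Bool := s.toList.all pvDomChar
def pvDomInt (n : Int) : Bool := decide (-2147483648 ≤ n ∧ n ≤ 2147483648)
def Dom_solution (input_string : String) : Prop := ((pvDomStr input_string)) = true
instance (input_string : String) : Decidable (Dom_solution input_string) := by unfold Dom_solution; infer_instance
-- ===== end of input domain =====

-- B replaces A's quadratic nested index scans by a single pass counting runs per character
-- in a dict, then sorting the characters with at least two runs (objective: faster).
-- ''.join over a list of single-character strings is ported as String.ofList of the char list (exact).

-- ===== PORT A =====
def solution (input_string : String) : String :=
  -- answer = ''; solo_alphabet = []; check_list = []; temp = []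
  -- for i in input_string: check_list.append(i)
  let check_list : List Char := input_string.toList.foldl (fun acc i => acc ++ [i]) []
  -- for i in range(0, len(check_list)-1): if check_list[i] != check_list[i+1]:
  --   for j in range(i+1, len(check_list)): if check_list[i] == check_list[j]: solo_alphabet.append(check_list[i])
  let solo_alphabet : List Char :=
    (PySem.List.pyRange 0 ((check_list.length : Int) - 1) 1).foldl (fun acc i =>
      if PySem.List.pyGetD check_list i ' ' ≠ PySem.List.pyGetD check_list (i + 1) ' ' then
        (PySem.List.pyRange (i + 1) (check_list.length : Int) 1).foldl (fun acc2 j =>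
          if PySem.List.pyGetD check_list i ' ' = PySem.List.pyGetD check_list j ' ' then
            acc2 ++ [PySem.List.pyGetD check_list i ' ']
          else acc2) acc
      else acc) []
  if solo_alphabet.length = 0 then "N"
  else
    -- temp = list(sorted(set(solo_alphabet))); answer = ''.join(temp)
    String.ofList (PySem.List.sorted (PySem.Set.ofList solo_alphabet) (fun x => x) false)

-- ===== PORT B =====
def solution_alt (input_string : String) : String :=
  -- counts = {}; prev = None
  -- for ch in input_string: if ch != prev: counts[ch] = counts.get(ch, 0) + 1; prev = ch
  let st : PySem.Dict Char Int × Option Char :=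
    input_string.toList.foldl (fun st ch =>
      (if some ch ≠ st.2 then st.1.insert ch (st.1.getD ch 0 + 1) else st.1, some ch))
      (PySem.Dict.empty, none)
  -- lonely = sorted(c for c, n in counts.items() if n >= 2)
  let lonely : List Char :=
    PySem.List.sorted ((st.1.items.filter (fun p => 2 ≤ p.2)).map Prod.fst) (fun x => x) false
  -- return ''.join(lonely) if lonely else 'N'
  if lonely = [] then "N" else String.ofList lonely

-- ===== PRECONDITION & SPEC =====
def Spec_solution (input_string : String) (out : String) : Prop := out = solution_alt input_string
instance (input_string : String) (out : String) : Decidable (Spec_solution input_string out) := by unfold Spec_solution; infer_instance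

-- ===== CLAIM (what is proved, stated in full; the proofs are below) =====
def Claim_equal_solution : Prop := ∀ (input_string : String), Dom_solution input_string → Spec_solution input_string (solution input_string)

-- ===== LEMMAS AND PROOFS =====

-- run-start list: the first character of every maximal run of equal characters, given the previous char
def rl : Option Char → List Char → List Char
  | _, [] => []
  | p, x :: xs => if some x ≠ p then x :: rl (some x) xs else rl p xs

-- A's appending condition, as a pure proposition on indices
def AC (l : List Char) (c : Char) : Prop :=
  ∃ a b : Nat, a < b ∧ l[a]? = some c ∧ (∃ d, l[a + 1]? = some d ∧ d ≠ c) ∧ l[b]? = some c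

-- A's solo_alphabet list, named
def soloList (l : List Char) : List Char :=
  (PySem.List.pyRange 0 ((l.length : Int) - 1) 1).foldl (fun acc i =>
    if PySem.List.pyGetD l i ' ' ≠ PySem.List.pyGetD l (i + 1) ' ' then
      (PySem.List.pyRange (i + 1) (l.length : Int) 1).foldl (fun acc2 j =>
        if PySem.List.pyGetD l i ' ' = PySem.List.pyGetD l j ' ' then
          acc2 ++ [PySem.List.pyGetD l i ' ']
        else acc2) acc
    else acc) []

lemma solution_eq (s : String) :
    solution s =
      if (soloList s.toList).length = 0 then "N"
      else String.ofList (PySem.List.sorted (PySem.Set.ofList (soloList s.toList)) (fun x => x) false) := by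
  simp only [solution, soloList, PySem.List.foldl_append_singleton_eq_self, List.nil_append]

lemma bfold (l : List Char) (d : PySem.Dict Char Int) (p : Option Char) :
    (List.foldl (fun st ch =>
        (if some ch ≠ st.2 then st.1.insert ch (st.1.getD ch 0 + 1) else st.1, some ch)) (d, p) l).1
      = List.foldl (fun d x => d.insert x (d.getD x 0 + 1)) d (rl p l) := by
  induction l generalizing d p with
  | nil => simp [rl]
  | cons x xs ih =>
    simp only [List.foldl_cons]
    by_cases h : some x ≠ p
    · rw [if_pos h, show rl p (x :: xs) = x :: rl (some x) xs from by simp [rl, h]]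
      simp only [List.foldl_cons]
      exact ih _ _
    · rw [not_ne_iff] at h
      subst h
      rw [if_neg (by simp), show rl (some x) (x :: xs) = rl (some x) xs from by simp [rl]]
      exact ih _ _

lemma solution_alt_eq (s : String) :
    solution_alt s =
      (if PySem.List.sorted ((PySem.Set.ofList (rl none s.toList)).filter
            (fun c => decide (2 ≤ ((rl none s.toList).count c : Int)))) (fun x => x) false = []
       then "N"
       else String.ofList (PySem.List.sorted ((PySem.Set.ofList (rl none s.toList)).filter
            (fun c => decide (2 ≤ ((rl none s.toList).count c : Int)))) (fun x => x) false)) := by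
  have h1 := bfold s.toList PySem.Dict.empty none
  simp only [solution_alt]
  rw [h1, PySem.Dict.foldl_insert_getD_add_one_eq_counter, PySem.Dict.items_counter]
  rw [List.filter_map, List.map_map]
  simp only [Function.comp_def]
  simp

lemma rl_mem (c : Char) : ∀ (l : List Char) (p : Option Char), p ≠ some c → (c ∈ rl p l ↔ c ∈ l) := by
  intro l
  induction l with
  | nil => simp [rl]
  | cons x xs ih =>
    intro p hp
    by_cases h : some x ≠ p
    · rw [show rl p (x :: xs) = x :: rl (some x) xs from by simp [rl, h]]
      rw [List.mem_cons, List.mem_cons]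
      by_cases hxc : c = x
      · simp [hxc]
      · rw [ih (some x) (fun hh => hxc (Option.some.inj hh).symm)]
    · rw [not_ne_iff] at h
      subst h
      rw [show rl (some x) (x :: xs) = rl (some x) xs from by simp [rl]]
      rw [ih (some x) hp, List.mem_cons]
      have hxc : ¬ c = x := fun hh => hp (by rw [hh])
      simp [hxc]

lemma AC_mem {l : List Char} {c : Char} (h : AC l c) : c ∈ l := by
  obtain ⟨a, b, _, ha, _, _⟩ := h
  exact List.mem_of_getElem? ha

lemma AC_cons (x : Char) (xs : List Char) (c : Char) :
    AC (x :: xs) c ↔ (x = c ∧ (∃ d, xs[0]? = some d ∧ d ≠ c) ∧ c ∈ xs) ∨ AC xs c := by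
  constructor
  · rintro ⟨a, b, hab, ha, ⟨d, hd, hdc⟩, hb⟩
    obtain ⟨b', rfl⟩ : ∃ b', b = b' + 1 := ⟨b - 1, by omega⟩
    cases a with
    | zero =>
      left
      simp only [List.getElem?_cons_zero, Option.some.injEq] at ha
      simp only [List.getElem?_cons_succ] at hd hb
      exact ⟨ha, ⟨d, hd, hdc⟩, List.mem_of_getElem? hb⟩
    | succ a' =>
      right
      simp only [List.getElem?_cons_succ] at ha hd hb
      exact ⟨a', b', by omega, ha, ⟨d, hd, hdc⟩, hb⟩
  · rintro (⟨rfl, ⟨d, hd, hdc⟩, hc⟩ | ⟨a, b, hab, ha, ⟨d, hd, hdc⟩, hb⟩)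
    · obtain ⟨b', hb'⟩ := List.mem_iff_getElem?.1 hc
      exact ⟨0, b' + 1, by omega, by simp, ⟨d, by simpa using hd, hdc⟩, by simpa using hb'⟩
    · exact ⟨a + 1, b + 1, by omega, by simpa using ha, ⟨d, by simpa using hd, hdc⟩, by simpa using hb⟩

lemma AC_iff_count (l : List Char) (c : Char) : AC l c ↔ 2 ≤ (rl none l).count c := by
  induction l with
  | nil => simp [AC, rl]
  | cons x xs ih =>
    cases xs with
    | nil =>
      rw [AC_cons]
      simp only [AC, rl]
      simp [List.count_cons]
      split <;> omega
    | cons y t =>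
      rw [AC_cons]
      by_cases hxy : x = y
      · subst hxy
        have hrl : rl none (x :: x :: t) = x :: rl (some x) t := by simp [rl]
        have hrl3 : rl none (x :: t) = x :: rl (some x) t := by simp [rl]
        rw [hrl, ← hrl3, ← ih]
        constructor
        · rintro (⟨rfl, ⟨d, hd, hdc⟩, _⟩ | h)
          · simp at hd
            exact absurd hd.symm hdc
          · exact h
        · exact Or.inr
      · have hyx : ¬ y = x := fun hh => hxy hh.symm
        have hrl : rl none (x :: y :: t) = x :: y :: rl (some y) t := by simp [rl, hyx]
        have hrl3 : rl none (y :: t) = y :: rl (some y) t := by simp [rl]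
        by_cases hxc : x = c
        · have hyc : y ≠ c := fun hh => hxy (hxc.trans hh.symm)
          have hcy : ¬ c = y := fun hh => hyc hh.symm
          have hmem : c ∈ rl (some y) t ↔ c ∈ t := rl_mem c t (some y) (by simp only [ne_eq, Option.some.injEq]; exact hyc)
          rw [hrl]
          have hcnt : List.count c (x :: y :: rl (some y) t) = List.count c (rl (some y) t) + 1 := by
            simp [hxc, hyc]
          rw [hcnt]
          constructor
          · rintro (⟨_, _, hc⟩ | h)
            · have hct : c ∈ t := by
                rcases List.mem_cons.1 hc with h' | h'
                · exact absurd h'.symm hyc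
                · exact h'
              have := List.count_pos_iff.2 (hmem.2 hct)
              omega
            · have hct : c ∈ t := by
                rcases List.mem_cons.1 (AC_mem h) with h' | h'
                · exact absurd h'.symm hyc
                · exact h'
              have := List.count_pos_iff.2 (hmem.2 hct)
              omega
          · intro h
            have hct : c ∈ t := hmem.1 (List.count_pos_iff.1 (by omega))
            exact Or.inl ⟨hxc, ⟨y, by simp, hyc⟩, List.mem_cons_of_mem _ hct⟩
        · rw [hrl]
          have hcx : ¬ c = x := fun hh => hxc hh.symm
          have hcnt : List.count c (x :: y :: rl (some y) t) = List.count c (rl none (y :: t)) := by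
            rw [hrl3]
            simp [List.count_cons, hxc]
          rw [hcnt]
          simp only [hxc, false_and, false_or]
          exact ih

lemma mem_soloList (l : List Char) (c : Char) : c ∈ soloList l ↔ AC l c := by
  unfold soloList
  have hbody : (fun (acc : List Char) (i : Int) =>
      if PySem.List.pyGetD l i ' ' ≠ PySem.List.pyGetD l (i + 1) ' ' then
        (PySem.List.pyRange (i + 1) (l.length : Int) 1).foldl (fun acc2 j =>
          if PySem.List.pyGetD l i ' ' = PySem.List.pyGetD l j ' ' then
            acc2 ++ [PySem.List.pyGetD l i ' ']
          else acc2) acc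
      else acc)
    = fun acc i => acc ++ (if PySem.List.pyGetD l i ' ' ≠ PySem.List.pyGetD l (i + 1) ' ' then
        ((PySem.List.pyRange (i + 1) (l.length : Int) 1).filter
          (fun j => decide (PySem.List.pyGetD l i ' ' = PySem.List.pyGetD l j ' '))).map
          (fun _ => PySem.List.pyGetD l i ' ') else []) := by
    funext acc i
    split
    · exact PySem.List.foldl_append_ite (p := fun j => PySem.List.pyGetD l i ' ' = PySem.List.pyGetD l j ' ') (fun _ => PySem.List.pyGetD l i ' ') _ _
    · simp
  rw [hbody, PySem.List.foldl_append_eq_flatMap]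
  simp only [List.nil_append, List.mem_flatMap, PySem.List.mem_pyRange_one,
    List.mem_ite_nil_right, List.mem_map, List.mem_filter, decide_eq_true_eq]
  have E : ∀ (k : Nat), k < l.length → PySem.List.pyGetD l (k : Int) ' ' = l.getD k ' ' := by
    intro k hk
    rw [PySem.List.pyGetD_natCast]
  constructor
  · rintro ⟨i, ⟨h0, h1⟩, hne, j, ⟨⟨hj1, hj2⟩, heq⟩, hc⟩
    have ha : i.toNat + 1 < l.length := by omega
    have hb : j.toNat < l.length := by omega
    have ei : (i : Int) = ((i.toNat : Nat) : Int) := by omega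
    have ej : (j : Int) = ((j.toNat : Nat) : Int) := by omega
    have cast1 : ((i.toNat : Int) + 1) = ((i.toNat + 1 : Nat) : Int) := by omega
    rw [ei, cast1, E _ (by omega), E _ ha] at hne
    rw [ei, ej, E _ (by omega), E _ hb] at heq
    rw [ei, E _ (by omega)] at hc
    rw [List.getD_eq_getElem l ' ' (show i.toNat < l.length by omega),
      List.getD_eq_getElem l ' ' ha] at hne
    rw [List.getD_eq_getElem l ' ' (show i.toNat < l.length by omega),
      List.getD_eq_getElem l ' ' hb] at heq
    rw [List.getD_eq_getElem l ' ' (show i.toNat < l.length by omega)] at hc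
    refine ⟨i.toNat, j.toNat, by omega, ?_, ⟨l[i.toNat + 1]'ha, List.getElem?_eq_getElem ha, ?_⟩, ?_⟩
    · rw [List.getElem?_eq_getElem (show i.toNat < l.length by omega), hc]
    · intro hdc
      exact hne (hc.trans hdc.symm)
    · rw [List.getElem?_eq_getElem hb, ← heq, hc]
  · rintro ⟨a, b, hab, ha, ⟨d, hd, hdc⟩, hb⟩
    rw [List.getElem?_eq_some_iff] at ha hd hb
    obtain ⟨ha1, ha2⟩ := ha
    obtain ⟨hd1, hd2⟩ := hd
    obtain ⟨hb1, hb2⟩ := hb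
    have cab : ((a : Int) + 1) = (((a + 1 : Nat)) : Int) := by omega
    refine ⟨(a : Int), ⟨by omega, by omega⟩, ?_, (b : Int), ⟨⟨by omega, by omega⟩, ?_⟩, ?_⟩
    · rw [cab, E a (by omega), E (a + 1) hd1,
        List.getD_eq_getElem l ' ' ha1, List.getD_eq_getElem l ' ' hd1, ha2, hd2]
      exact fun h => hdc h.symm
    · rw [E a (by omega), E b hb1,
        List.getD_eq_getElem l ' ' ha1, List.getD_eq_getElem l ' ' hb1, ha2, hb2]
    · rw [E a (by omega), List.getD_eq_getElem l ' ' ha1, ha2]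

lemma sorted_eq_of_mem_iff {xs ys : List Char} (hx : xs.Nodup) (hy : ys.Nodup)
    (h : ∀ c, c ∈ xs ↔ c ∈ ys) :
    PySem.List.sorted xs (fun x => x) false = PySem.List.sorted ys (fun x => x) false := by
  have hperm : xs.Perm ys := (List.perm_ext_iff_of_nodup hx hy).2 h
  apply PySem.List.sorted_eq_of_perm_of_pairwise_lt
  · exact (PySem.List.sorted_perm ys (fun x => x) false).trans hperm.symm
  · have h1 := PySem.List.sorted_pairwise (xs := ys) (key := fun x => x)
    have h2 : (PySem.List.sorted ys (fun x => x) false).Nodup :=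
      (PySem.List.sorted_perm ys (fun x => x) false).nodup_iff.2 hy
    exact (h1.and h2).imp (fun hh => lt_of_le_of_ne hh.1 hh.2)

lemma fl_mem (r : List Char) (c : Char) :
    c ∈ (PySem.Set.ofList r).filter (fun c => decide (2 ≤ ((r.count c : Int)))) ↔ 2 ≤ r.count c := by
  constructor
  · intro h
    rcases List.mem_filter.1 h with ⟨_, h2⟩
    have := of_decide_eq_true h2
    exact_mod_cast this
  · intro h
    refine List.mem_filter.2 ⟨?_, decide_eq_true (by exact_mod_cast h)⟩
    exact (PySem.Set.mem_ofList _ _).2 (List.count_pos_iff.1 (by omega))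

-- ===== VERDICT (by name: the statement is the Claim_ definition above) =====
theorem solution_spec : Claim_equal_solution := by
  intro s _
  unfold Spec_solution
  rw [solution_eq, solution_alt_eq]
  have hmem : ∀ c, c ∈ soloList s.toList ↔ 2 ≤ (rl none s.toList).count c :=
    fun c => (mem_soloList s.toList c).trans (AC_iff_count s.toList c)
  have hset : ∀ c, c ∈ PySem.Set.ofList (soloList s.toList) ↔
      c ∈ (PySem.Set.ofList (rl none s.toList)).filter
        (fun c => decide (2 ≤ (((rl none s.toList).count c : Int)))) := by
    intro c
    rw [PySem.Set.mem_ofList, hmem c, fl_mem]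
  have hsorted : PySem.List.sorted (PySem.Set.ofList (soloList s.toList)) (fun x => x) false
      = PySem.List.sorted ((PySem.Set.ofList (rl none s.toList)).filter
          (fun c => decide (2 ≤ (((rl none s.toList).count c : Int))))) (fun x => x) false :=
    sorted_eq_of_mem_iff (PySem.Set.nodup_ofList _)
      ((PySem.Set.nodup_ofList _).filter _) hset
  have hp := PySem.List.sorted_perm ((PySem.Set.ofList (rl none s.toList)).filter
      (fun c => decide (2 ≤ (((rl none s.toList).count c : Int))))) (fun x => x) false
  have hempty : (soloList s.toList).length = 0 ↔
      PySem.List.sorted ((PySem.Set.ofList (rl none s.toList)).filter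
        (fun c => decide (2 ≤ (((rl none s.toList).count c : Int))))) (fun x => x) false = [] := by
    rw [List.length_eq_zero_iff]
    constructor
    · intro h
      have hfl0 : (PySem.Set.ofList (rl none s.toList)).filter
          (fun c => decide (2 ≤ (((rl none s.toList).count c : Int)))) = [] := by
        refine List.eq_nil_iff_forall_not_mem.2 (fun c hc => ?_)
        have h2 := (fl_mem _ c).1 hc
        have h3 := (hmem c).2 h2
        rw [h] at h3
        exact absurd h3 List.not_mem_nil
      exact List.Perm.eq_nil (hfl0 ▸ hp)
    · intro h
      have hfl0 := List.Perm.eq_nil (h ▸ hp.symm)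
      refine List.eq_nil_iff_forall_not_mem.2 (fun c hc => ?_)
      have h2 := (hmem c).1 hc
      have h3 := (fl_mem (rl none s.toList) c).2 h2
      rw [hfl0] at h3
      exact absurd h3 List.not_mem_nil
  by_cases h0 : (soloList s.toList).length = 0
  · rw [if_pos h0, if_pos (hempty.1 h0)]
  · rw [if_neg h0, if_neg (fun hh => h0 (hempty.2 hh)), hsorted]
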